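-- pv_equiv track=rewrite | github.com/fraco-oxza/mastermind | app.py | get_hex_color
-- ===== SOURCE A (Python) =====
-- COLORS = """
-- -n|naranjo:#F6421B;
-- -c|celeste:#26B2EB;
-- -v|verde:#24D417;
-- -a|amarillo:#F6C202;
-- -p|purpura:#8217D4;
-- -b|blanco:#FEFDFA;
-- -r|rosado:#FF21D1;
-- """
--
-- def get_hex_color(color_code: str) -> str:
--     """
--     Function to get a Color Code from the
--     COLORS const based on a Color Key.
--     If not exists, return a empty string
--     """
--     i = 0
--     last_is_dash = False
--     color = ""
--
--     while i < len(COLORS):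
--         if COLORS[i] == "-":  # Find the dash
--             last_is_dash = True
--         else:
--             if last_is_dash and COLORS[i] == color_code:
--                 while COLORS[i] != "#":
--                     # Forward in the COLORS until the Number sign
--                     i += 1
--                 while COLORS[i] != ";":
--                     # Save the Color Code that ends in the Semicolon sign
--                     color += COLORS[i]
--                     i += 1
--                 return color
--             last_is_dash = False
--         i += 1
--     return color  # Return the empty string, if not exists one color with that Code
-- ===== SOURCE B (Python) =====
-- COLORS = """
-- -n|naranjo:#F6421B;
-- -c|celeste:#26B2EB;
-- -v|verde:#24D417;
-- -a|amarillo:#F6C202;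
-- -p|purpura:#8217D4;
-- -b|blanco:#FEFDFA;
-- -r|rosado:#FF21D1;
-- """
--
-- # Precompute once: code char (right after the dash) -> hex value (from '#' up to ';').
-- _TABLE = {}
-- for _line in COLORS.splitlines():
--     if _line:
--         _TABLE[_line[1]] = _line[_line.find("#"):_line.find(";")]
--
--
-- def get_hex_color(color_code: str) -> str:
--     return _TABLE.get(color_code, "")
-- ===== Notes on version B (the rewrite author's own statement) =====
-- stated objective: idiomatic
-- what changed: Replaced the hand-rolled character-scanning state machine over COLORS with a dict built once by parsing each line (key = char after the dash, value = substring from '#' to ';'), so the function body is a single table lookup.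
import Mathlib
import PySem

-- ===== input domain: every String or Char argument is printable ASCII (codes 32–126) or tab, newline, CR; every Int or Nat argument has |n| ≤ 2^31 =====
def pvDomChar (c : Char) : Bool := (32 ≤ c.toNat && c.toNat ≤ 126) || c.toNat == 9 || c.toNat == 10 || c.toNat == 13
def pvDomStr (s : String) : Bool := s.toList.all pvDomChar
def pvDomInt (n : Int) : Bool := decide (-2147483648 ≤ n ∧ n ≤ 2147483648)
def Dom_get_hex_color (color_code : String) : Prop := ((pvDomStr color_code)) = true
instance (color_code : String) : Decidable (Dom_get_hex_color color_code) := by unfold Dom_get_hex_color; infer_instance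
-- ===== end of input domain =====

-- B replaces A's character-scanning state machine over COLORS with a dict precomputed
-- by parsing each line once; the function body becomes a single table lookup (idiomatic).


-- the module-level constant COLORS (shared by both programs)
def pvCOLORS : String := "\n-n|naranjo:#F6421B;\n-c|celeste:#26B2EB;\n-v|verde:#24D417;\n-a|amarillo:#F6C202;\n-p|purpura:#8217D4;\n-b|blanco:#FEFDFA;\n-r|rosado:#FF21D1;\n"

-- ===== PORT A =====
-- A's while-loop over i with state (last_is_dash, color) as structural recursion on the
-- remaining characters; the two inner whiles (skip to '#', collect until ';') are
-- dropWhile/takeWhile on the remaining characters starting at the current position.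
def pvGoA (key : String) : List Char → Bool → String → String
  | [], _, color => color
  | c :: rest, lastDash, color =>
    if c = '-' then pvGoA key rest true color
    else if lastDash = true ∧ String.ofList [c] = key then
      color ++ String.ofList (((c :: rest).dropWhile (fun x => x ≠ '#')).takeWhile (fun x => x ≠ ';'))
    else pvGoA key rest false color

def get_hex_color (color_code : String) : String :=
  pvGoA color_code pvCOLORS.toList false ""

-- ===== PORT B =====
-- the dict built once from COLORS: for each nonempty line, key = line[1],
-- value = line[line.find('#'):line.find(';')]
def pvTable : PySem.Dict String String :=
  (PySem.Str.splitlines pvCOLORS).foldl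
    (fun d line =>
      if line ≠ "" then
        match PySem.Str.pyGet? line 1 with
        | some ch =>
            d.insert (String.ofList [ch])
              (PySem.Str.slice line (some (PySem.Str.find line "#")) (some (PySem.Str.find line ";")))
        | none => d  -- line[1] raises only on a 1-char line; COLORS has none
      else d)
    PySem.Dict.empty

def get_hex_color_alt (color_code : String) : String :=
  pvTable.getD color_code ""

-- ===== PRECONDITION & SPEC =====
def Spec_get_hex_color (color_code : String) (out : String) : Prop := out = get_hex_color_alt color_code
instance (color_code : String) (out : String) : Decidable (Spec_get_hex_color color_code out) := by unfold Spec_get_hex_color; infer_instance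

-- ===== CLAIM (what is proved, stated in full; the proofs are below) =====
def Claim_equal_get_hex_color : Prop := ∀ (color_code : String), Dom_get_hex_color color_code → Spec_get_hex_color color_code (get_hex_color color_code)

-- ===== LEMMAS AND PROOFS =====

set_option maxRecDepth 20000 in
set_option maxHeartbeats 1000000 in
theorem pvCOLORS_toList : pvCOLORS.toList = ['\n', '-', 'n', '|', 'n', 'a', 'r', 'a', 'n', 'j', 'o', ':', '#', 'F', '6', '4', '2', '1', 'B', ';', '\n', '-', 'c', '|', 'c', 'e', 'l', 'e', 's', 't', 'e', ':', '#', '2', '6', 'B', '2', 'E', 'B', ';', '\n', '-', 'v', '|', 'v', 'e', 'r', 'd', 'e', ':', '#', '2', '4', 'D', '4', '1', '7', ';', '\n', '-', 'a', '|', 'a', 'm', 'a', 'r', 'i', 'l', 'l', 'o', ':', '#', 'F', '6', 'C', '2', '0', '2', ';', '\n', '-', 'p', '|', 'p', 'u', 'r', 'p', 'u', 'r', 'a', ':', '#', '8', '2', '1', '7', 'D', '4', ';', '\n', '-', 'b', '|', 'b', 'l', 'a', 'n', 'c', 'o', ':', '#', 'F', 'E', 'F', 'D', 'F', 'A', ';',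 '\n', '-', 'r', '|', 'r', 'o', 's', 'a', 'd', 'o', ':', '#', 'F', 'F', '2', '1', 'D', '1', ';', '\n'] := by
  decide

set_option maxRecDepth 20000 in
set_option maxHeartbeats 1000000 in
theorem pvTable_eq : pvTable = PySem.Dict.mk [("n", "#F6421B"), ("c", "#26B2EB"), ("v", "#24D417"), ("a", "#F6C202"), ("p", "#8217D4"), ("b", "#FEFDFA"), ("r", "#FF21D1")] := by
  decide

-- ===== VERDICT (by name: the statement is the Claim_ definition above) =====
set_option maxRecDepth 20000 in
set_option maxHeartbeats 1000000 in
theorem get_hex_color_spec : Claim_equal_get_hex_color := by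
  intro s _
  unfold Spec_get_hex_color
  by_cases hn : s = "n"; · subst hn; decide
  by_cases hc : s = "c"; · subst hc; decide
  by_cases hv : s = "v"; · subst hv; decide
  by_cases ha : s = "a"; · subst ha; decide
  by_cases hp : s = "p"; · subst hp; decide
  by_cases hb : s = "b"; · subst hb; decide
  by_cases hr : s = "r"; · subst hr; decide
  have hmn : String.ofList ['n'] ≠ s := fun e => hn e.symm
  have hmc : String.ofList ['c'] ≠ s := fun e => hc e.symm
  have hmv : String.ofList ['v'] ≠ s := fun e => hv e.symm
  have hma : String.ofList ['a'] ≠ s := fun e => ha e.symm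
  have hmp : String.ofList ['p'] ≠ s := fun e => hp e.symm
  have hmb : String.ofList ['b'] ≠ s := fun e => hb e.symm
  have hmr : String.ofList ['r'] ≠ s := fun e => hr e.symm
  rw [get_hex_color, get_hex_color_alt, pvCOLORS_toList, pvTable_eq]
  simp [pvGoA, PySem.Dict.getD, PySem.Dict.get?,
        hmn, hmc, hmv, hma, hmp, hmb, hmr,
        Ne.symm hn, Ne.symm hc, Ne.symm hv, Ne.symm ha, Ne.symm hp, Ne.symm hb, Ne.symm hr]
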